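-- pv_equiv track=rewrite | github.com/an10nimus/MyCodeForces | Round_645_Div_2/B/B.py | solve
-- ===== SOURCE A (Python) =====
-- def solve(n, ss):
--     cum_sum = 0 # nothing for the initial granny
--     candidate_ans = 0
--     index = indices = [0]*(2*10**5 + 5)
--     lowest = 10**6
--     highest = 0
--     inp_arr = ss.split(' ')
--     nonzero_indices= []
--     sum_available = 0
--     for under_s in  inp_arr:
--         a = int(under_s)
--         if a <= n+1:
--             sum_available += 1
--             index[a] += 1
--             if lowest > a:
--                 lowest = a
--             if highest < a:
--                 highest = a
--             nonzero_indices.append(a)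
--         else:
--             n -= 1
--     if n == 1:
--         if nonzero_indices[0] == 1:
--             candidate_ans = 1
--         else:
--             candidate_ans = 0
--     else:
--         if highest <= sum_available:
--             candidate_ans = sum_available
--         else:
--             nonzero_set = sorted(set(nonzero_indices))[::-1]
--             i = 0
--             cum_sum = sum_available
--             while i < len(nonzero_set):
--                 counter = nonzero_set[i]
--                 if counter <= cum_sum:
--                     candidate_ans = cum_sum
--                     i = len(nonzero_set)
--                 else:
--                     new = index[counter]
--                     cum_sum -= new
--                     i += 1
--             # for counter in nonzero_set: #count cumulative sum
--     candidate_ans += 1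
--     return candidate_ans
-- ===== SOURCE B (Python) =====
-- def solve(n, ss):
--     vals = []
--     for t in ss.split(' '):
--         a = int(t)
--         if a <= n + 1:
--             vals.append(a)
--         else:
--             n -= 1
--     if n == 1:
--         return 2 if vals[0] == 1 else 1
--     s = sorted(vals)
--     best = 0
--     for k in range(1, len(s) + 1):
--         if s[k - 1] <= k:
--             best = k
--     return best + 1
-- ===== Notes on version B (the rewrite author's own statement) =====
-- stated objective: simpler
-- what changed: B drops the 200005-slot frequency array, the lowest/highest tracking, the distinct-set and the descending group-removal loop, and instead sorts the kept values ascending and takes the largest k with sorted[k-1] <= k in one forward scan (the highest<=count shortcut becomes the k=len case of the same scan). Pre_ excludes inputs where A raises (unparseable tokens incl. …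
-- outside the precondition, e.g. on solve(5, '-3'): A returns 2, B returns 2
import Mathlib
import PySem

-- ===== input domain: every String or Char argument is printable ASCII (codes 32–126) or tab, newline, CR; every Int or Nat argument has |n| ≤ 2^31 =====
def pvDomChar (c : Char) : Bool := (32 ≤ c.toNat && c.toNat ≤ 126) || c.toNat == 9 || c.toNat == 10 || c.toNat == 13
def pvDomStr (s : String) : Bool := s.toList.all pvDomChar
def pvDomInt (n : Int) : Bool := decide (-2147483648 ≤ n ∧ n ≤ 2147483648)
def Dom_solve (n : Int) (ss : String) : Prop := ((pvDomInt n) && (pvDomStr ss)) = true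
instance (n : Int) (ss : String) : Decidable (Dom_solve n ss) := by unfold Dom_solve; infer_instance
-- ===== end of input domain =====

-- B replaces A's 200005-slot frequency array, lowest/highest tracking, distinct-set and
-- descending group-removal loop by one ascending scan over the sorted kept values
-- (largest k with sorted[k-1] ≤ k); same return value on Pre_.

-- ===== PORT A =====
-- Python's list `index = [0]*(2*10**5+5)` with `index[a] += 1` is modelled as a total
-- function Int → Int (pointwise update); exact for the in-range indices 0 ≤ a ≤ 200004
-- that Pre_ guarantees for every kept value (out of range Python raises or wraps).
structure AState where
  n : Int
  sumAvail : Int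
  index : Int → Int
  lowest : Int
  highest : Int
  nz : List Int

-- one iteration of A's `for under_s in inp_arr` loop; int(t) failing raises ValueError
-- in Python (excluded by Pre_), `.getD 0` is the junk value there
def aStep (st : AState) (t : String) : AState :=
  let a := (PySem.Int.ofStr? t).getD 0
  if a ≤ st.n + 1 then
    { n := st.n, sumAvail := st.sumAvail + 1,
      index := fun v => if v = a then st.index a + 1 else st.index v,
      lowest := if a < st.lowest then a else st.lowest,
      highest := if st.highest < a then a else st.highest,
      nz := st.nz ++ [a] }
  else
    { st with n := st.n - 1 }

-- A's `while i < len(nonzero_set)` loop with its early exit (`i = len(nonzero_set)`)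
def aPeel (d : List Int) (cum : Int) (idx : Int → Int) : Int :=
  match d with
  | [] => 0
  | counter :: rest => if counter ≤ cum then cum else aPeel rest (cum - idx counter) idx

def solve (n : Int) (ss : String) : Int :=
  let inpArr := (PySem.Str.split? ss " ").getD []
  let st := inpArr.foldl aStep ⟨n, 0, fun _ => 0, 1000000, 0, []⟩
  let candidateAns :=
    if st.n = 1 then
      -- nonzero_indices[0]: IndexError on [] is excluded by Pre_, `.getD 0` is junk there
      if (PySem.List.pyGet? st.nz 0).getD 0 = 1 then 1 else 0
    else
      if st.highest ≤ st.sumAvail then st.sumAvail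
      else
        let nonzeroSet := ((PySem.List.slice? (PySem.List.sorted (PySem.Set.ofList st.nz) (fun x => x) false) none none (-1)).getD [])
        aPeel nonzeroSet st.sumAvail st.index
  candidateAns + 1

-- ===== PORT B =====
def bFilter : List String → Int → List Int → Int × List Int
  | [], n, acc => (n, acc)
  | t :: ts, n, acc =>
    let a := (PySem.Int.ofStr? t).getD 0
    if a ≤ n + 1 then bFilter ts n (acc ++ [a]) else bFilter ts (n - 1) acc

-- `for k in range(1, len(s)+1): if s[k-1] <= k: best = k`
def bScan (s : List Int) : Int :=
  (PySem.List.pyRange 1 ((s.length : Int) + 1) 1).foldl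
    (fun best k => if (PySem.List.pyGet? s (k - 1)).getD 0 ≤ k then k else best) 0

def solve_alt (n : Int) (ss : String) : Int :=
  let r := bFilter ((PySem.Str.split? ss " ").getD []) n []
  if r.1 = 1 then
    if (PySem.List.pyGet? r.2 0).getD 0 = 1 then 2 else 1
  else
    bScan (PySem.List.sorted r.2 (fun x => x) false) + 1

-- ===== PRECONDITION & SPEC =====
-- Pre_ excludes the inputs where A raises — a token int() cannot parse (ValueError; this
-- includes the empty string), a kept value above the counting array's bound 200004
-- (IndexError), and the all-rejected case with final n == 1 (IndexError on
-- nonzero_indices[0]) — and, as a natural-domain restriction, negative kept thresholds,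
-- which A counts only through Python's negative-index wraparound in its fixed-size array.
def Pre_solve (n : Int) (ss : String) : Prop :=
  (∀ t ∈ (PySem.Str.split? ss " ").getD [], (PySem.Int.ofStr? t).isSome = true) ∧
  (∀ t ∈ (PySem.Str.split? ss " ").getD [],
      (0 ≤ (PySem.Int.ofStr? t).getD 0 ∧ (PySem.Int.ofStr? t).getD 0 ≤ 200004) ∨
      n + 1 < (PySem.Int.ofStr? t).getD 0) ∧
  ¬(n = (((PySem.Str.split? ss " ").getD []).length : Int) + 1 ∧
      ∀ p ∈ PySem.List.enumerate ((PySem.Str.split? ss " ").getD []) 0,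
        n - p.1 + 1 < (PySem.Int.ofStr? p.2).getD 0)
instance (n : Int) (ss : String) : Decidable (Pre_solve n ss) := by unfold Pre_solve; infer_instance

def pvWitness_solve : Int × String := (3, "1 2 2")

def Spec_solve (n : Int) (ss : String) (out : Int) : Prop := out = solve_alt n ss
instance (n : Int) (ss : String) (out : Int) : Decidable (Spec_solve n ss out) := by unfold Spec_solve; infer_instance

-- ===== CLAIM (what is proved, stated in full; the proofs are below) =====
def Claim_equal_solve : Prop := ∀ (n : Int) (ss : String), Dom_solve n ss → Pre_solve n ss → Spec_solve n ss (solve n ss)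

-- ===== LEMMAS AND PROOFS =====

-- number of elements of `vals` that are ≤ x
def leCnt (vals : List Int) (x : Int) : Nat := vals.countP (fun a => decide (a ≤ x))

theorem leCnt_mono (vals : List Int) {x y : Int} (h : x ≤ y) : leCnt vals x ≤ leCnt vals y :=
  List.countP_mono_left (by intro a _ ha; simp only [decide_eq_true_eq] at ha ⊢; omega)

theorem leCnt_le_length (vals : List Int) (x : Int) : leCnt vals x ≤ vals.length :=
  List.countP_le_length

-- loop invariant: A's fold state determines (and is determined by) B's filter
theorem loop_rel : ∀ (toks : List String) (st : AState),
    st.sumAvail = (st.nz.length : Int) →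
    (∀ v, st.index v = (st.nz.count v : Int)) →
    st.highest = st.nz.foldl max 0 →
    (toks.foldl aStep st).n = (bFilter toks st.n st.nz).1 ∧
    (toks.foldl aStep st).nz = (bFilter toks st.n st.nz).2 ∧
    (toks.foldl aStep st).sumAvail = (((toks.foldl aStep st).nz).length : Int) ∧
    (∀ v, (toks.foldl aStep st).index v = (((toks.foldl aStep st).nz).count v : Int)) ∧
    (toks.foldl aStep st).highest = ((toks.foldl aStep st).nz).foldl max 0 := by
  intro toks
  induction toks with
  | nil => intro st h1 h2 h3; exact ⟨rfl, rfl, h1, h2, h3⟩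
  | cons t ts ih =>
    intro st h1 h2 h3
    simp only [List.foldl_cons, bFilter]
    by_cases ha : (PySem.Int.ofStr? t).getD 0 ≤ st.n + 1
    · rw [if_pos ha]
      have hstep : aStep st t =
          { n := st.n, sumAvail := st.sumAvail + 1,
            index := fun v => if v = (PySem.Int.ofStr? t).getD 0 then st.index ((PySem.Int.ofStr? t).getD 0) + 1 else st.index v,
            lowest := if (PySem.Int.ofStr? t).getD 0 < st.lowest then (PySem.Int.ofStr? t).getD 0 else st.lowest,
            highest := if st.highest < (PySem.Int.ofStr? t).getD 0 then (PySem.Int.ofStr? t).getD 0 else st.highest,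
            nz := st.nz ++ [(PySem.Int.ofStr? t).getD 0] } := by
        simp only [aStep]; rw [if_pos ha]
      rw [hstep]
      apply ih
      · simp only [List.length_append, List.length_cons, List.length_nil]
        push_cast; omega
      · intro v
        show (if v = (PySem.Int.ofStr? t).getD 0 then st.index ((PySem.Int.ofStr? t).getD 0) + 1 else st.index v)
          = ((st.nz ++ [(PySem.Int.ofStr? t).getD 0]).count v : Int)
        by_cases hv : v = (PySem.Int.ofStr? t).getD 0
        · rw [if_pos hv, hv, h2, List.count_append]
          have h4 : List.count ((PySem.Int.ofStr? t).getD 0) [(PySem.Int.ofStr? t).getD 0] = 1 := by simp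
          rw [h4]; push_cast; ring
        · rw [if_neg hv, h2, List.count_append]
          have h4 : List.count v [(PySem.Int.ofStr? t).getD 0] = 0 :=
            List.count_eq_zero.mpr (by simpa using hv)
          rw [h4]; push_cast; ring
      · simp only [List.foldl_append, List.foldl_cons, List.foldl_nil, ← h3]
        rcases lt_or_ge st.highest ((PySem.Int.ofStr? t).getD 0) with h | h
        · rw [if_pos h, max_eq_right h.le]
        · rw [if_neg (not_lt.mpr h), max_eq_left h]
    · rw [if_neg ha]
      have hstep : aStep st t = { st with n := st.n - 1 } := by
        simp only [aStep]; rw [if_neg ha]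
      rw [hstep]
      exact ih _ h1 h2 h3

theorem sorted_getElem_le_iff (s : List Int) (hs : s.Pairwise (· ≤ ·)) (i : Nat)
    (hi : i < s.length) (x : Int) :
    (s[i] ≤ x ↔ i + 1 ≤ leCnt s x) := by
  have hpw := List.pairwise_iff_getElem.mp hs
  constructor
  · intro h
    have hcnt : leCnt s x =
        (s.take (i+1)).countP (fun a => decide (a ≤ x)) + (s.drop (i+1)).countP (fun a => decide (a ≤ x)) := by
      rw [leCnt, ← List.countP_append, List.take_append_drop]
    have hful : (s.take (i+1)).countP (fun a => decide (a ≤ x)) = (s.take (i+1)).length := by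
      rw [List.countP_eq_length]
      intro a hmem
      obtain ⟨j, hj, rfl⟩ := List.getElem_of_mem hmem
      have hj' : j ≤ i := by simp only [List.length_take] at hj; omega
      have hj2 : j < s.length := by omega
      rw [List.getElem_take]
      simp only [decide_eq_true_eq]
      rcases Nat.lt_or_ge j i with hlt | hge
      · exact le_trans (hpw j i hj2 hi hlt) h
      · have hji : j = i := by omega
        subst hji; exact h
    have hlen : (s.take (i+1)).length = i + 1 := by
      simp only [List.length_take]; omega
    omega
  · intro h
    by_contra hx
    rw [not_le] at hx
    have hdrop : (s.drop i).countP (fun a => decide (a ≤ x)) = 0 := by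
      rw [List.countP_eq_zero]
      intro a hmem
      obtain ⟨j, hj, rfl⟩ := List.getElem_of_mem hmem
      have hij : i + j < s.length := by simp only [List.length_drop] at hj; omega
      rw [List.getElem_drop]
      simp only [decide_eq_true_eq, not_le]
      rcases Nat.eq_zero_or_pos j with h0 | hpos
      · subst h0; simpa using hx
      · exact lt_of_lt_of_le hx (hpw i (i+j) hi hij (by omega))
    have hcnt : leCnt s x =
        (s.take i).countP (fun a => decide (a ≤ x)) + (s.drop i).countP (fun a => decide (a ≤ x)) := by
      rw [leCnt, ← List.countP_append, List.take_append_drop]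
    have hple : (s.take i).countP (fun a => decide (a ≤ x)) ≤ (s.take i).length :=
      List.countP_le_length
    have hlen : (s.take i).length = i := by simp only [List.length_take]; omega
    omega

theorem exists_top (vals : List Int) (k : Int) (h : 1 ≤ leCnt vals k) :
    ∃ w, w ∈ vals ∧ w ≤ k ∧ leCnt vals k ≤ leCnt vals w := by
  have hlen : leCnt vals k = (vals.filter (fun a => decide (a ≤ k))).length :=
    List.countP_eq_length_filter
  have hF : vals.filter (fun a => decide (a ≤ k)) ≠ [] := by
    intro h0; rw [h0] at hlen; simp at hlen; omega
  cases hM : PySem.List.max? (vals.filter (fun a => decide (a ≤ k))) (fun x => x) with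
  | none => exact absurd ((PySem.List.max?_eq_none_iff _ _).mp hM) hF
  | some w =>
    have hw := PySem.List.max?_mem hM
    have hmax := PySem.List.max?_isMax hM
    rw [List.mem_filter] at hw
    refine ⟨w, hw.1, by simpa using hw.2, ?_⟩
    apply List.countP_mono_left
    intro a ha hak
    simp only [decide_eq_true_eq] at hak ⊢
    exact hmax a (List.mem_filter.mpr ⟨ha, by simpa using hak⟩)

-- count of `≤ c` splits at the next-smaller distinct value c'
-- count of `≤ c` splits at the next-smaller distinct value c'
theorem leCnt_split (vals : List Int) (c c' : Int) (hcc : c' < c)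
    (h : ∀ a ∈ vals, (a ≤ c ↔ (a ≤ c' ∨ a = c))) :
    leCnt vals c = leCnt vals c' + List.count c vals := by
  induction vals with
  | nil => rfl
  | cons b bs ih =>
    have hb := h b (by simp)
    have ihr := ih (fun a ha => h a (by simp [ha]))
    simp only [leCnt, List.countP_cons, List.count_cons, beq_iff_eq] at ihr ⊢
    by_cases h1 : b ≤ c'
    · have h2 : b ≤ c := le_trans h1 hcc.le
      have h3 : ¬ b = c := by omega
      simp [h1, h2, h3, ihr]
      omega
    · by_cases h2 : b = c
      · subst h2
        simp [h1, ihr]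
        omega
      · have h3 : ¬ b ≤ c := by
          intro hbc
          rcases hb.mp hbc with hx | hx
          · exact h1 hx
          · exact h2 hx
        simp [h1, h2, h3, ihr]

theorem fg_congr (P Q : Nat → Prop) [DecidablePred P] [DecidablePred Q] :
    ∀ m : Nat, (∀ k, 1 ≤ k → k ≤ m → (P k ↔ Q k)) →
    Nat.findGreatest P m = Nat.findGreatest Q m := by
  intro m
  induction m with
  | zero => intro _; rfl
  | succ m ih =>
    intro h
    rw [Nat.findGreatest_succ, Nat.findGreatest_succ]
    have h1 : P (m + 1) ↔ Q (m + 1) := h (m + 1) (by omega) (by omega)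
    by_cases hp : P (m + 1)
    · rw [if_pos hp, if_pos (h1.mp hp)]
    · rw [if_neg hp, if_neg (fun hq => hp (h1.mpr hq)),
        ih (fun k h1k hkm => h k h1k (by omega))]

-- B's scan is Nat.findGreatest of the prefix test
theorem bScan_eq (s : List Int) :
    bScan s = (Nat.findGreatest
      (fun k => (PySem.List.pyGet? s ((k : Int) - 1)).getD 0 ≤ (k : Int)) s.length : Int) := by
  suffices h : ∀ m : Nat,
      (PySem.List.pyRange 1 ((m : Int) + 1)).foldl
        (fun best k => if (PySem.List.pyGet? s (k - 1)).getD 0 ≤ k then k else best) 0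
        = (Nat.findGreatest
            (fun k => (PySem.List.pyGet? s ((k : Int) - 1)).getD 0 ≤ (k : Int)) m : Int) by
    exact h s.length
  intro m
  induction m with
  | zero => rw [PySem.List.pyRange_one_eq_nil (by omega)]; rfl
  | succ m ih =>
    have hcast : ((m + 1 : Nat) : Int) + 1 = ((m : Int) + 1) + 1 := by push_cast; ring
    rw [hcast, PySem.List.pyRange_one_succ_right (by omega), List.foldl_append]
    simp only [List.foldl_cons, List.foldl_nil]
    rw [ih, Nat.findGreatest_succ]
    by_cases hp : (PySem.List.pyGet? s ((m : Int) + 1 - 1)).getD 0 ≤ (m : Int) + 1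
    · rw [if_pos hp, if_pos (by push_cast; exact hp)]; push_cast; ring
    · rw [if_neg hp, if_neg (by push_cast; exact hp)]

-- on a sorted list the prefix test is `k ≤ leCnt k`
theorem bScan_eq_leCnt (vals : List Int) :
    bScan (PySem.List.sorted vals (fun x => x) false)
      = (Nat.findGreatest (fun k => ((k : Int) ≤ (leCnt vals (k : Int) : Int))) vals.length : Int) := by
  have hperm := PySem.List.sorted_perm vals (fun x => x) false
  have hlen : (PySem.List.sorted vals (fun x => x) false).length = vals.length :=
    hperm.length_eq
  rw [bScan_eq, hlen]
  congr 1
  apply fg_congr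
  intro k h1k hklen
  have hk' : ((k : Int) - 1) < ((PySem.List.sorted vals (fun x => x) false).length : Int) := by
    rw [hlen]; omega
  have hget := PySem.List.pyGet?_eq_some_getElem (PySem.List.sorted vals (fun x => x) false)
    (i := (k : Int) - 1) (by omega) hk'
  rw [hget]
  simp only [Option.getD_some]
  have hidx : ((k : Int) - 1).toNat < (PySem.List.sorted vals (fun x => x) false).length := by
    omega
  have hiff := sorted_getElem_le_iff (PySem.List.sorted vals (fun x => x) false)
    (PySem.List.sorted_pairwise vals (fun x => x)) (((k : Int) - 1).toNat) hidx (k : Int)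
  have hcntEq : leCnt (PySem.List.sorted vals (fun x => x) false) (k : Int) = leCnt vals (k : Int) :=
    hperm.countP_eq _
  rw [hcntEq] at hiff
  have htn : ((k : Int) - 1).toNat + 1 = k := by omega
  constructor
  · intro h
    have := hiff.mp h
    omega
  · intro h
    apply hiff.mpr
    omega

-- A's descending peel computes the same findGreatest
theorem aPeel_eq (vals : List Int) : ∀ (d : List Int) (cum : Int),
    d.Pairwise (· > ·) → (∀ c ∈ d, c ∈ vals) →
    (∀ a ∈ vals, a ∉ d → (leCnt vals a : Int) < a) →
    (∀ c ∈ d.head?, (∀ a ∈ vals, a ≤ c → a ∈ d) ∧ cum = (leCnt vals c : Int)) →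
    aPeel d cum (fun v => (vals.count v : Int))
      = (Nat.findGreatest (fun k => ((k : Int) ≤ (leCnt vals (k : Int) : Int))) vals.length : Int) := by
  intro d
  induction d with
  | nil =>
    intro cum _ _ H3b _
    rw [aPeel]
    have h0 : Nat.findGreatest (fun k => ((k : Int) ≤ (leCnt vals (k : Int) : Int))) vals.length = 0 := by
      apply Nat.findGreatest_eq_zero_iff.mpr
      intro k hk _ hQ
      have h1 : 1 ≤ leCnt vals (k : Int) := by omega
      obtain ⟨w, hwv, hwk, hwle⟩ := exists_top vals (k : Int) h1
      have hfail := H3b w hwv (by simp)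
      have hww : leCnt vals (k : Int) ≤ leCnt vals w := hwle
      omega
    rw [h0]; rfl
  | cons c rest ih =>
    intro cum hpw hmem H3b hhead
    obtain ⟨hcover, hcum⟩ := hhead c (by simp)
    have hpc := List.pairwise_cons.mp hpw
    rw [aPeel]
    by_cases hc : c ≤ cum
    · rw [if_pos hc]
      rw [hcum] at hc ⊢
      have hFG : Nat.findGreatest (fun k => ((k : Int) ≤ (leCnt vals (k : Int) : Int))) vals.length
          = leCnt vals c := by
        apply Nat.findGreatest_eq_iff.mpr
        refine ⟨leCnt_le_length _ _, fun _ => ?_, fun k hk hklen hQ => ?_⟩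
        · show ((leCnt vals c : Int) ≤ (leCnt vals ((leCnt vals c : Nat) : Int) : Int))
          exact_mod_cast leCnt_mono vals hc
        · have h1 : 1 ≤ leCnt vals (k : Int) := by omega
          obtain ⟨w, hwv, hwk, hwle⟩ := exists_top vals (k : Int) h1
          have hwc : c < w := by
            by_contra hle
            rw [not_lt] at hle
            have := leCnt_mono vals hle
            omega
          have hwd : w ∉ c :: rest := by
            intro hin
            rcases List.mem_cons.mp hin with hx | hx
            · omega
            · exact absurd (hpc.1 w hx) (by omega)
          have hfail := H3b w hwv hwd
          omega
      rw [hFG]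
    · rw [if_neg hc]
      rw [hcum] at hc
      apply ih (cum - (vals.count c : Int)) hpc.2 (fun c' h => hmem c' (List.mem_cons_of_mem _ h))
      · intro a ha hnot
        by_cases hac : a = c
        · subst hac
          omega
        · apply H3b a ha
          intro hin
          rcases List.mem_cons.mp hin with hx | hx
          · exact hac hx
          · exact hnot hx
      · intro c' hc'
        have hc'mem : c' ∈ rest := List.mem_of_mem_head? hc'
        have hcc' : c' < c := hpc.1 c' hc'mem
        have hresthead : ∀ a ∈ rest, a ≤ c' := by
          intro a ha
          cases hrest : rest with
          | nil => rw [hrest] at ha; simp at ha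
          | cons r rs =>
            have hr : r = c' := by rw [hrest] at hc'; simpa using hc'
            rw [hrest] at ha hpw
            rcases List.mem_cons.mp ha with hx | hx
            · omega
            · have := (List.pairwise_cons.mp (List.pairwise_cons.mp hpw).2).1 a hx
              omega
        constructor
        · intro a ha hale
          have hin := hcover a ha (le_trans hale hcc'.le)
          rcases List.mem_cons.mp hin with hx | hx
          · omega
          · exact hx
        · have hsplit : leCnt vals c = leCnt vals c' + List.count c vals := by
            apply leCnt_split vals c c' hcc'
            intro a ha
            constructor
            · intro hac
              by_cases hae : a = c
              · exact Or.inr hae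
              · left
                have hin := hcover a ha hac
                rcases List.mem_cons.mp hin with hx | hx
                · exact absurd hx hae
                · exact hresthead a hx
            · intro hor
              rcases hor with hx | hx
              · exact le_trans hx hcc'.le
              · omega
          rw [hcum, hsplit]
          push_cast
          ring

-- ===== VERDICT (by name: the statement is the Claim_ definition above) =====
theorem solve_spec : Claim_equal_solve := by
  unfold Claim_equal_solve
  intro n ss _hdom _hpre
  unfold Spec_solve solve solve_alt
  dsimp only
  obtain ⟨hn, hnz, hsum, hidx, hhi⟩ :=
    loop_rel ((PySem.Str.split? ss " ").getD []) ⟨n, 0, fun _ => 0, 1000000, 0, []⟩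
      (by simp) (by intro v; simp) (by simp)
  set toks := (PySem.Str.split? ss " ").getD [] with htoks
  set st := toks.foldl aStep ⟨n, 0, fun _ => 0, 1000000, 0, []⟩ with hst
  set r := bFilter toks n [] with hr
  rw [hn, hnz]
  by_cases h1 : r.1 = 1
  · rw [if_pos h1, if_pos h1]
    by_cases hh : (PySem.List.pyGet? r.2 0).getD 0 = 1
    · rw [if_pos hh, if_pos hh]; norm_num
    · rw [if_neg hh, if_neg hh]; norm_num
  · rw [if_neg h1, if_neg h1]
    have key : (if st.highest ≤ st.sumAvail then st.sumAvail
        else aPeel ((PySem.List.slice? (PySem.List.sorted (PySem.Set.ofList r.2) fun x => x) none none (-1)).getD [])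
          st.sumAvail st.index) = bScan (PySem.List.sorted r.2 fun x => x) := by
      rw [bScan_eq_leCnt r.2]
      by_cases hsh : st.highest ≤ st.sumAvail
      · rw [if_pos hsh, hsum, hnz]
        have hall : leCnt r.2 ((r.2.length : Nat) : Int) = r.2.length := by
          rw [leCnt, List.countP_eq_length]
          intro a ha
          simp only [decide_eq_true_eq]
          have h2 : a ≤ List.foldl max 0 r.2 := (PySem.List.le_foldl_max r.2 0).2 a ha
          have h3 : List.foldl max 0 r.2 = st.highest := by rw [hhi, hnz]
          have h4 : st.sumAvail = ((r.2.length : Nat) : Int) := by rw [hsum, hnz]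
          omega
        have hFG : Nat.findGreatest (fun k => ((k : Int) ≤ (leCnt r.2 (k : Int) : Int))) r.2.length
            = r.2.length := by
          apply Nat.findGreatest_eq_iff.mpr
          refine ⟨le_refl _, fun _ => ?_, fun k hk hklen => by omega⟩
          rw [hall]
        rw [hFG]
      · rw [if_neg hsh]
        have hvne : r.2 ≠ [] := by
          intro h0
          apply hsh
          have h2 : st.highest = 0 := by rw [hhi, hnz, h0]; rfl
          have h3 : st.sumAvail = 0 := by rw [hsum, hnz, h0]; rfl
          omega
        rw [PySem.List.slice?_none_none_neg_one]
        simp only [Option.getD_some]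
        have hidxf : st.index = fun v => (List.count v r.2 : Int) :=
          funext (fun v => by rw [hidx v, hnz])
        rw [hidxf, hsum, hnz]
        have hpair : ((PySem.List.sorted (PySem.Set.ofList r.2) (fun x => x) false).reverse).Pairwise (· > ·) :=
          List.pairwise_reverse.mpr (PySem.List.sorted_ofList_pairwise_lt r.2)
        have hall : ∀ a ∈ r.2, a ∈ (PySem.List.sorted (PySem.Set.ofList r.2) (fun x => x) false).reverse := by
          intro a ha
          rw [List.mem_reverse, PySem.List.mem_sorted]
          exact (PySem.Set.mem_ofList r.2 a).mpr ha
        apply aPeel_eq r.2 ((PySem.List.sorted (PySem.Set.ofList r.2) (fun x => x) false).reverse)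
          ((r.2.length : Nat) : Int) hpair
        · intro c hc
          rw [List.mem_reverse, PySem.List.mem_sorted] at hc
          exact (PySem.Set.mem_ofList r.2 c).mp hc
        · intro a ha hnot
          exact absurd (hall a ha) hnot
        · intro c hc
          have hcd : c ∈ (PySem.List.sorted (PySem.Set.ofList r.2) (fun x => x) false).reverse :=
            List.mem_of_mem_head? hc
          refine ⟨fun a ha _ => hall a ha, ?_⟩
          have hmax : ∀ a ∈ r.2, a ≤ c := by
            intro a ha
            have had := hall a ha
            cases hd : (PySem.List.sorted (PySem.Set.ofList r.2) (fun x => x) false).reverse with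
            | nil => rw [hd] at hcd; simp at hcd
            | cons x xs =>
              have hx : x = c := by rw [hd] at hc; simpa using hc
              have hp := List.pairwise_cons.mp (hd ▸ hpair)
              rw [hd] at had
              rcases List.mem_cons.mp had with hy | hy
              · omega
              · have := hp.1 a hy; omega
          have hlc : leCnt r.2 c = r.2.length := by
            rw [leCnt, List.countP_eq_length]
            intro a ha
            simpa using hmax a ha
          rw [hlc]
    rw [key]
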